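-- pv_equiv track=rewrite | github.com/sytranvn/tic_tac_toe_bitboard | src/tic_tac_toe_bitboard/bitboard.py | set_row
-- ===== SOURCE A (Python) =====
-- from typing import TYPE_CHECKING, List, Literal, Tuple
--
-- BitBoard = List[int]
--
-- def set_row(board: BitBoard, row: int) -> BitBoard:
--     """
--     Set all bit of a row to 1
--     """
--     new_board = board[:]
--     size = len(board)
--     assert row < size, "Row exceeded"
--     set_row = 0
--     for i in range(size):
--         set_row |= 1 << i
--     new_board[row] = set_row
--     return new_board
-- ===== SOURCE B (Python) =====
-- def set_row(board, row):
--     new_board = board[:]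
--     size = len(board)
--     assert row < size, "Row exceeded"
--     new_board[row] = (1 << size) - 1
--     return new_board
-- ===== Notes on version B (the rewrite author's own statement) =====
-- stated objective: faster
-- what changed: Replaces the bit-accumulation loop (OR-ing 1<<i over range(size)) with the closed-form full-row mask (1<<size)-1 assigned once.
import Mathlib
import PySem

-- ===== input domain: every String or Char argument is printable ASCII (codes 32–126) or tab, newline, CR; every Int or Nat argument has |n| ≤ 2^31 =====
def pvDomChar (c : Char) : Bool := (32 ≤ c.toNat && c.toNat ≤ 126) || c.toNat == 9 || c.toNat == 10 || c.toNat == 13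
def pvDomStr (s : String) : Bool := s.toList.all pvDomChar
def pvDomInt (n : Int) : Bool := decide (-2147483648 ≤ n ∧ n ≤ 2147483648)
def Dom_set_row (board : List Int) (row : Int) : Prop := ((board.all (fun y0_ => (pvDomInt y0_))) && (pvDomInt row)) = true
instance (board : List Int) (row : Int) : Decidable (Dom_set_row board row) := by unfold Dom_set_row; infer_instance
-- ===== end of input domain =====

-- B replaces A's bit-accumulation loop by the closed-form row mask (1 << size) - 1 (simpler).


-- Python's '1 << i' with a nonnegative shift (shift amount as Nat, per PySem's shift convention)
def pyShl1 (k : Nat) : Int := (1 : Int) <<< k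

-- ===== PORT A =====
-- new_board = board[:]; mask accumulated by OR-ing 1 << i over range(size); new_board[row] = mask
def set_row (board : List Int) (row : Int) : List Int :=
  let new_board := PySem.List.slice board none none
  let size : Int := board.length
  let mask := (PySem.List.pyRange 0 size 1).foldl
    (fun s i => PySem.Int.bor s (pyShl1 i.toNat)) 0
  PySem.List.pySetD new_board row mask

-- ===== PORT B =====
-- new_board = board[:]; new_board[row] = (1 << size) - 1
def set_row_alt (board : List Int) (row : Int) : List Int :=
  let new_board := PySem.List.slice board none none
  let size := board.length
  PySem.List.pySetD new_board row (pyShl1 size - 1)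

-- ===== PRECONDITION & SPEC =====
-- A raises on row ≥ len(board) (AssertionError) and on row < -len(board) (IndexError); Pre_ is exactly Python's in-range condition.
def Pre_set_row (board : List Int) (row : Int) : Prop := PySem.Raise.InRange board.length row
instance (board : List Int) (row : Int) : Decidable (Pre_set_row board row) := by unfold Pre_set_row; infer_instance
def pvWitness_set_row : List Int × Int := ([0, 0, 0], 1)
def Spec_set_row (board : List Int) (row : Int) (out : List Int) : Prop := out = set_row_alt board row
instance (board : List Int) (row : Int) (out : List Int) : Decidable (Spec_set_row board row out) := by unfold Spec_set_row; infer_instance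

-- ===== CLAIM (what is proved, stated in full; the proofs are below) =====
def Claim_equal_set_row : Prop := ∀ (board : List Int) (row : Int), Dom_set_row board row → Pre_set_row board row → Spec_set_row board row (set_row board row)

-- ===== LEMMAS AND PROOFS =====

theorem pv_or_pow (n : Nat) : (2 ^ n - 1) ||| 2 ^ n = 2 ^ (n + 1) - 1 := by
  apply Nat.eq_of_testBit_eq
  intro i
  simp only [Nat.testBit_or, Nat.testBit_two_pow_sub_one, Nat.testBit_two_pow]
  by_cases h1 : i < n <;> by_cases h2 : n = i <;> by_cases h3 : i < n + 1 <;> simp_all <;> omega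

theorem pv_shift_one (n : Nat) : pyShl1 n = ((2 ^ n : Nat) : Int) := by
  simp [pyShl1, Int.shiftLeft_eq]

-- A's OR-accumulation loop computes the closed-form mask 2^n - 1.
theorem pv_mask_fold (n : Nat) :
    (PySem.List.pyRange 0 (n : Int) 1).foldl
      (fun s i => PySem.Int.bor s (pyShl1 i.toNat)) 0
      = pyShl1 n - 1 := by
  induction n with
  | zero => decide
  | succ n ih =>
    rw [show ((n + 1 : Nat) : Int) = (n : Int) + 1 by push_cast; ring,
        PySem.List.pyRange_one_succ_right (by positivity), List.foldl_append, ih]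
    simp only [List.foldl_cons, List.foldl_nil, Int.toNat_natCast, pv_shift_one]
    rw [show ((2 ^ n : Nat) : Int) - 1 = ((2 ^ n - 1 : Nat) : Int) by
          have : 1 ≤ 2 ^ n := Nat.one_le_two_pow
          push_cast [this]; ring,
        PySem.Int.bor_natCast, pv_or_pow]
    have : 1 ≤ 2 ^ (n + 1) := Nat.one_le_two_pow
    push_cast [this]; ring

-- ===== VERDICT (by name: the statement is the Claim_ definition above) =====
theorem set_row_spec : Claim_equal_set_row := by
  intro board row _ _
  unfold Spec_set_row set_row set_row_alt
  simp only [pv_mask_fold board.length]
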